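-- pv_equiv track=rewrite | github.com/LeiLiLab/susvibes | susvibes/safety_strategies/tools.py | diff_logs
-- ===== SOURCE A (Python) =====
-- def diff_logs(func_test_logs, sec_test_logs):
--     func_lines = func_test_logs.splitlines()
--     sec_lines = sec_test_logs.splitlines()
--     diff_lines = []
--     count_lines = {}
--     for line in func_lines:
--         count_lines[line] = count_lines.get(line, 0) + 1
--     for line in sec_lines:
--         if count_lines.get(line, 0) > 0:
--             count_lines[line] -= 1
--         else:
--             diff_lines.append(line)
--     return diff_lines
-- ===== SOURCE B (Python) =====
-- def diff_logs(func_test_logs, sec_test_logs):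
--     result = sec_test_logs.splitlines()
--     for line in func_test_logs.splitlines():
--         try:
--             result.remove(line)
--         except ValueError:
--             pass
--     return result
-- ===== Notes on version B (the rewrite author's own statement) =====
-- stated objective: simpler
-- what changed: B keeps no counter dict: it starts from the sec lines and deletes, per func line, the first matching occurrence via list.remove (swallowing a miss), instead of A's count-then-decrement two-pass scheme.
import Mathlib
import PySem

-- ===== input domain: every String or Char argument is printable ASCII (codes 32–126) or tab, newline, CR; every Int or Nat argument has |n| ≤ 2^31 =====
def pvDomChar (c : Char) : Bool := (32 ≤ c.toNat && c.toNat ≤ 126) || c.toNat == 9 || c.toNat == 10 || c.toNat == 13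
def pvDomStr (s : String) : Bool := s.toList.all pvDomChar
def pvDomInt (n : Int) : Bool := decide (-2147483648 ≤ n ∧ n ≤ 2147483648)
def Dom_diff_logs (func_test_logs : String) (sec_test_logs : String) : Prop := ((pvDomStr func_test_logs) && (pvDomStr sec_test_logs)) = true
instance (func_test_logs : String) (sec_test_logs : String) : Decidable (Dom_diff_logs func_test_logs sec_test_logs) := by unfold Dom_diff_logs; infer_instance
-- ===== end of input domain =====

-- B replaces A's count-then-decrement two-pass scheme by deleting, per func line, the
-- first matching occurrence from the sec lines (list.remove, misses swallowed): simpler.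

-- ===== PORT A =====
def diff_logs (func_test_logs : String) (sec_test_logs : String) : List String :=
  let func_lines := PySem.Str.splitlines func_test_logs
  let sec_lines := PySem.Str.splitlines sec_test_logs
  let count_lines : PySem.Dict String Int :=
    func_lines.foldl (fun d line => d.insert line (d.getD line 0 + 1)) PySem.Dict.empty
  let st := sec_lines.foldl
    (fun (st : List String × PySem.Dict String Int) line =>
      if st.2.getD line 0 > 0 then
        (st.1, st.2.insert line (st.2.getD line 0 - 1))
      else
        (st.1 ++ [line], st.2))
    ([], count_lines)
  st.1

-- ===== PORT B =====
def diff_logs_alt (func_test_logs : String) (sec_test_logs : String) : List String :=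
  (PySem.Str.splitlines func_test_logs).foldl
    (fun res line =>
      match PySem.List.remove? res line with
      | some r => r          -- result.remove(line)
      | none => res)         -- except ValueError: pass
    (PySem.Str.splitlines sec_test_logs)

-- ===== PRECONDITION & SPEC =====
def Spec_diff_logs (func_test_logs : String) (sec_test_logs : String) (out : List String) : Prop := out = diff_logs_alt func_test_logs sec_test_logs
instance (func_test_logs : String) (sec_test_logs : String) (out : List String) : Decidable (Spec_diff_logs func_test_logs sec_test_logs out) := by unfold Spec_diff_logs; infer_instance

-- ===== CLAIM (what is proved, stated in full; the proofs are below) =====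
def Claim_equal_diff_logs : Prop := ∀ (func_test_logs : String) (sec_test_logs : String), Dom_diff_logs func_test_logs sec_test_logs → Spec_diff_logs func_test_logs sec_test_logs (diff_logs func_test_logs sec_test_logs)

-- ===== LEMMAS AND PROOFS =====

-- Canonical form both programs reduce to: walk the sec lines with a count function,
-- dropping a line while its count is positive.
def dropCounts (c : String → Int) : List String → List String
  | [] => []
  | x :: xs => if c x > 0 then dropCounts (Function.update c x (c x - 1)) xs
               else x :: dropCounts c xs

-- A's counting loop computes the occurrence count.
theorem counter_getD (fs : List String) (d : PySem.Dict String Int) (x : String) :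
    (fs.foldl (fun d line => d.insert line (d.getD line 0 + 1)) d).getD x 0
      = d.getD x 0 + (fs.count x : Int) := by
  induction fs generalizing d with
  | nil => simp
  | cons f fs ih =>
    simp only [List.foldl_cons, ih, PySem.Dict.getD_insert, List.count_cons]
    by_cases h : x = f
    · simp [h]; ring_nf
    · simp [h, Ne.symm h]

-- A's second loop is dropCounts of the dict's count function.
theorem loopA_eq_dropCounts (sec : List String) (diff : List String)
    (d : PySem.Dict String Int) :
    (sec.foldl
      (fun (st : List String × PySem.Dict String Int) line =>
        if st.2.getD line 0 > 0 then
          (st.1, st.2.insert line (st.2.getD line 0 - 1))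
        else
          (st.1 ++ [line], st.2))
      (diff, d)).1
      = diff ++ dropCounts (fun x => d.getD x 0) sec := by
  induction sec generalizing diff d with
  | nil => simp [dropCounts]
  | cons x xs ih =>
    simp only [List.foldl_cons, dropCounts]
    by_cases h : d.getD x 0 > 0
    · simp only [h, if_pos]
      rw [ih]
      congr 1
      congr 1
      funext y
      simp only [PySem.Dict.getD_insert, Function.update]
      by_cases hy : y = x <;> simp [hy]
    · simp only [h, if_false]
      rw [ih]
      simp

-- dropCounts of the zero function keeps everything.
theorem dropCounts_zero (sec : List String) (c : String → Int) (h : ∀ x, c x = 0) :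
    dropCounts c sec = sec := by
  induction sec generalizing c with
  | nil => rfl
  | cons x xs ih =>
    have hx := h x
    simp only [dropCounts, hx]
    rw [if_neg (by omega)]
    congr 1
    exact ih c h

-- Incrementing the count of f is the same as erasing the first f beforehand.
theorem dropCounts_update_succ (sec : List String) (c : String → Int) (f : String)
    (hf : 0 ≤ c f) :
    dropCounts (Function.update c f (c f + 1)) sec = dropCounts c (sec.erase f) := by
  induction sec generalizing c with
  | nil => rfl
  | cons x xs ih =>
    by_cases hx : x = f
    · subst hx
      have h1 : Function.update c x (c x + 1) x = c x + 1 := by simp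
      simp only [dropCounts, h1, List.erase_cons_head]
      rw [if_pos (by omega)]
      have : Function.update (Function.update c x (c x + 1)) x (c x + 1 - 1) = c := by
        funext y
        by_cases hy : y = x <;> simp [Function.update, hy]
      rw [this]
    · have hne : ¬ (x == f) = true := by simp [hx]
      rw [List.erase_cons_tail hne]
      have h1 : Function.update c f (c f + 1) x = c x := Function.update_of_ne hx _ _
      simp only [dropCounts, h1]
      by_cases hcx : c x > 0
      · rw [if_pos hcx, if_pos hcx]
        have hcomm : Function.update (Function.update c f (c f + 1)) x (c x - 1)
            = Function.update (Function.update c x (c x - 1)) f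
                ((Function.update c x (c x - 1)) f + 1) := by
          funext y
          by_cases hyx : y = x
          · subst hyx; simp [Function.update, hx]
          · by_cases hyf : y = f <;> simp [Function.update, hyx, hyf, Ne.symm hx]
        rw [hcomm, ih]
        simp [Function.update_of_ne (Ne.symm hx), hf]
      · rw [if_neg hcx, if_neg hcx]
        rw [ih c hf]

-- B's loop step is List.erase.
theorem removeStep_eq_erase (res : List String) (line : String) :
    (match PySem.List.remove? res line with
     | some r => r
     | none => res) = res.erase line := by
  by_cases h : line ∈ res
  · simp [PySem.List.remove?_eq_some_erase res line h]
  · simp [(PySem.List.remove?_eq_none_iff res line).mpr h, List.erase_of_not_mem h]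

-- B's whole loop is dropCounts of the func multiset counts.
theorem loopB_eq_dropCounts (fs sec : List String) :
    (fs.foldl
      (fun res line =>
        match PySem.List.remove? res line with
        | some r => r
        | none => res) sec)
      = dropCounts (fun x => (fs.count x : Int)) sec := by
  have hfun : (fun (res : List String) line =>
      match PySem.List.remove? res line with
      | some r => r
      | none => res) = fun (res : List String) line => res.erase line := by
    funext res line; exact removeStep_eq_erase res line
  rw [hfun]
  induction fs generalizing sec with
  | nil => rw [List.foldl_nil, dropCounts_zero]; intro x; simp
  | cons f fs ih =>
    rw [List.foldl_cons, ih (sec.erase f),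
        ← dropCounts_update_succ _ _ f (by positivity)]
    congr 1
    funext x
    simp only [Function.update, List.count_cons]
    by_cases hx : x = f
    · simp [hx]
    · simp [hx, Ne.symm hx]

-- ===== VERDICT (by name: the statement is the Claim_ definition above) =====
theorem diff_logs_spec : Claim_equal_diff_logs := by
  intro f s _
  show diff_logs f s = diff_logs_alt f s
  unfold diff_logs diff_logs_alt
  rw [loopA_eq_dropCounts, loopB_eq_dropCounts]
  simp only [List.nil_append]
  congr 1
  funext x
  rw [counter_getD]
  simp
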